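-- pv_equiv track=rewrite | github.com/davmag67/Rosalind-3 | CTBL.py | par_group
-- ===== SOURCE A (Python) =====
-- def par_group(tree):
--     par_stack=[] # Created a stack to track the parenthesis
--     par_couples=[]
--     for i in range(1,len(tree)-2): # Excluding the extreme parenthesis which refer to the root
--         if tree[i]=='(':
--             par_stack.append(i)
--         else:
--             if tree[i]==')':
--                 par_couples.append((par_stack.pop(),i))
--     return par_couples
-- ===== SOURCE B (Python) =====
-- def par_group(tree):
--     # Recursive descent over the nested groups instead of an explicit stack;
--     # a pair is appended the moment its closing ')' is reached, so the output
--     # order (by closing index) matches the stack version exactly.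
--     pairs = []
--     end = len(tree) - 2  # interior: indices 1 .. len(tree)-3
--
--     def scan(i):
--         # Handle successive sibling groups starting at i; return the index of
--         # the first ')' not opened at this level, or `end` if none remains.
--         while i < end:
--             c = tree[i]
--             if c == '(':
--                 j = scan(i + 1)
--                 if j < end:
--                     pairs.append((i, j))
--                     i = j + 1
--                 else:
--                     return end
--             elif c == ')':
--                 return i
--             else:
--                 i += 1
--         return end
--
--     i = 1
--     while i < end:
--         i = scan(i) + 1  # a ')' unmatched at top level is simply skipped
--     return pairs
-- ===== Notes on version B (the rewrite author's own statement) =====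
-- stated objective: alternative
-- what changed: Replaces A's explicit parenthesis stack and flat index loop by a recursive descent over the nested groups: a helper scans sibling groups, recurses on each opening parenthesis and returns at the first unmatched closing one, appending each (open, close) index pair the moment its group closes, so the output order by closing index matches A exactly.
-- outside the precondition, e.g. on par_group('()a)b)'): A raises IndexError, B returns []
import Mathlib
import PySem

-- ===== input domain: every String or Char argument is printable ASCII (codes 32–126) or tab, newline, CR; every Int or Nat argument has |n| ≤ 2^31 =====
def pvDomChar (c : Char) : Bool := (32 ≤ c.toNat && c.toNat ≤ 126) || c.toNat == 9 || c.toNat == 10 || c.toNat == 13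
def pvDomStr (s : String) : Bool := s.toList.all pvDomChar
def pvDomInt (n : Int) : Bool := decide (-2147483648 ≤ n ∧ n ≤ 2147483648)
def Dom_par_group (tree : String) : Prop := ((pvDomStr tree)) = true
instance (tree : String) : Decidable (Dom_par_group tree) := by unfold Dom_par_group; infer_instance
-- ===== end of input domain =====

-- B replaces A's explicit parenthesis stack by a recursive descent over the nested
-- groups (objective: alternative decomposition, same cost). Pre_ excludes the
-- unbalanced inputs on which A raises IndexError (pop from an empty stack).

-- ===== PORT A =====
-- one iteration of A's for-loop; state none = the IndexError raised by par_stack.pop()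
def pvStepA (cs : List Char) (st : Option (List Int × List (Int × Int))) (i : Int) :
    Option (List Int × List (Int × Int)) :=
  match st with
  | none => none
  | some (stack, couples) =>
    match PySem.List.pyGet? cs i with
    | none => none            -- tree[i] IndexError (unreachable: i is in range(1, len-2))
    | some c =>
      if c = '(' then some (stack ++ [i], couples)
      else if c = ')' then
        match PySem.List.pop? stack (-1) with
        | none => none        -- par_stack.pop() on an empty stack: IndexError
        | some (t, rest) => some (rest, couples ++ [(t, i)])
      else some (stack, couples)

def par_group (tree : String) : List (Int × Int) :=
  let cs := tree.toList
  match (PySem.List.pyRange 1 ((cs.length : Int) - 2) 1).foldl (pvStepA cs) (some ([], [])) with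
  | none => []                -- A raises here; inputs excluded by Pre_par_group
  | some (_, couples) => couples

-- ===== PORT B =====
-- Source B's `scan`: handles successive sibling groups from index i, returns the index of
-- the first closing parenthesis not opened at this level (or e), with the pairs it appended.
-- fuel = e - i bounds the recursion depth (totality device only; never exhausted when
-- e - i ≤ fuel, mirroring the Python which needs no bound).
def pvScanB (cs : List Char) (e : Nat) : Nat → Nat → Nat × List (Int × Int)
  | 0, i => (i, [])
  | fuel+1, i =>
    if i < e then
      let c := cs.getD i ' '
      if c = '(' then
        let r := pvScanB cs e fuel (i+1)
        if r.1 < e then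
          let r2 := pvScanB cs e fuel (r.1+1)
          (r2.1, r.2 ++ ((i : Int), (r.1 : Int)) :: r2.2)
        else (e, r.2)
      else if c = ')' then (i, [])
      else pvScanB cs e fuel (i+1)
    else (e, [])

-- Source B's top-level while loop
def pvTopB (cs : List Char) (e : Nat) : Nat → Nat → List (Int × Int)
  | 0, _ => []
  | fuel+1, i =>
    if i < e then
      let r := pvScanB cs e e i
      r.2 ++ pvTopB cs e fuel (r.1 + 1)
    else []

def par_group_alt (tree : String) : List (Int × Int) :=
  let cs := tree.toList
  let e := cs.length - 2
  pvTopB cs e e 1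

-- ===== PRECONDITION & SPEC =====
-- Pre_ excludes exactly the inputs on which A raises IndexError: a closing parenthesis
-- in the interior range(1, len-2) preceded (within that interior) by at least as many
-- closing as opening parentheses.
def Pre_par_group (tree : String) : Prop :=
  ∀ j ∈ List.range tree.toList.length, 1 ≤ j → j < tree.toList.length - 2 →
    tree.toList.getD j ' ' = ')' →
    ((tree.toList.drop 1).take (j - 1)).count ')' < ((tree.toList.drop 1).take (j - 1)).count '('
instance (tree : String) : Decidable (Pre_par_group tree) := by unfold Pre_par_group; infer_instance

def pvWitness_par_group : String := "((a,b)c);"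

def Spec_par_group (tree : String) (out : List (Int × Int)) : Prop := out = par_group_alt tree
instance (tree : String) (out : List (Int × Int)) : Decidable (Spec_par_group tree out) := by unfold Spec_par_group; infer_instance

-- ===== CLAIM (what is proved, stated in full; the proofs are below) =====
def Claim_equal_par_group : Prop := ∀ (tree : String), Dom_par_group tree → Pre_par_group tree → Spec_par_group tree (par_group tree)

-- ===== LEMMAS AND PROOFS =====

-- count of c among cs[i:j]
def pvCnt (cs : List Char) (c : Char) (i j : Nat) : Nat := ((cs.drop i).take (j - i)).count c

lemma pvCnt_self (cs : List Char) (c : Char) (i : Nat) : pvCnt cs c i i = 0 := by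
  simp [pvCnt]

lemma pvCnt_split (cs : List Char) (c : Char) {i j k : Nat} (hij : i ≤ j) (hjk : j ≤ k) :
    pvCnt cs c i k = pvCnt cs c i j + pvCnt cs c j k := by
  unfold pvCnt
  have h1 : k - i = (j - i) + (k - j) := by omega
  rw [h1, List.take_add, List.count_append, List.drop_drop]
  have h2 : i + (j - i) = j := by omega
  rw [h2]

lemma pvCnt_single (cs : List Char) (c : Char) {j : Nat} (hj : j < cs.length) :
    pvCnt cs c j (j+1) = if cs.getD j ' ' = c then 1 else 0 := by
  unfold pvCnt
  have ht : j + 1 - j = 1 := by omega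
  rw [ht, List.drop_eq_getElem_cons hj, List.take_succ_cons, List.take_zero,
      List.getD_eq_getElem?_getD, List.getElem?_eq_getElem hj]
  by_cases h : cs[j] = c <;> simp [h]

-- A's loop step at an in-range index, by the character there
lemma pvStepA_at (cs : List Char) {k : Nat} (hk : k < cs.length) (S : List Int) (P : List (Int × Int)) :
    pvStepA cs (some (S, P)) (k : Int) =
      (if cs.getD k ' ' = '(' then some (S ++ [(k : Int)], P)
       else if cs.getD k ' ' = ')' then
         match PySem.List.pop? S (-1) with
         | none => none
         | some (t, rest) => some (rest, P ++ [(t, (k : Int))])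
       else some (S, P)) := by
  have hg : PySem.List.pyGet? cs (k : Int) = some (cs.getD k ' ') := by
    rw [PySem.List.pyGet?_natCast, List.getElem?_eq_getElem hk,
        List.getD_eq_getElem?_getD, List.getElem?_eq_getElem hk]
    rfl
  simp [pvStepA, hg]

lemma pop_last_append (S : List Int) (x : Int) :
    PySem.List.pop? (S ++ [x]) (-1) = some (x, S) := by
  exact PySem.List.pop?_last S x

-- main invariant: what A's fold does over the segment Source B's `scan` consumes
lemma pvScan_spec (cs : List Char) (e : Nat) (he : e ≤ cs.length) :
    ∀ fuel i, i ≤ e → e - i ≤ fuel →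
      i ≤ (pvScanB cs e fuel i).1 ∧ (pvScanB cs e fuel i).1 ≤ e ∧
      ((pvScanB cs e fuel i).1 < e →
        cs.getD (pvScanB cs e fuel i).1 ' ' = ')' ∧
        pvCnt cs '(' i (pvScanB cs e fuel i).1 = pvCnt cs ')' i (pvScanB cs e fuel i).1 ∧
        ∀ S P, (PySem.List.pyRange (i : Int) ((pvScanB cs e fuel i).1 : Int) 1).foldl (pvStepA cs) (some (S, P))
          = some (S, P ++ (pvScanB cs e fuel i).2)) ∧
      ((pvScanB cs e fuel i).1 = e →
        ∀ S P, ∃ T, (PySem.List.pyRange (i : Int) (e : Int) 1).foldl (pvStepA cs) (some (S, P))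
          = some (S ++ T, P ++ (pvScanB cs e fuel i).2)) := by
  intro fuel
  induction fuel with
  | zero =>
    intro i hie hfe
    have hi : i = e := by omega
    subst hi
    refine ⟨le_refl _, le_refl _, ?_, ?_⟩
    · intro h; exact absurd h (by simp [pvScanB])
    · intro _ S P
      refine ⟨[], ?_⟩
      rw [PySem.List.pyRange_one_eq_nil (by omega)]
      simp [pvScanB]
  | succ fuel ih =>
    intro i hie hfe
    by_cases hi : i < e
    · have hlen : i < cs.length := by omega
      by_cases hop : cs.getD i ' ' = '('
      · -- '(' branch
        obtain ⟨h1, h2, h3, h4⟩ := ih (i+1) (by omega) (by omega)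
        set r := pvScanB cs e fuel (i+1) with hr
        by_cases hj : r.1 < e
        · obtain ⟨hclose, hcnt, hfold⟩ := h3 hj
          obtain ⟨g1, g2, g3, g4⟩ := ih (r.1+1) (by omega) (by omega)
          set r2 := pvScanB cs e fuel (r.1+1) with hr2
          have hres : pvScanB cs e (fuel+1) i = (r2.1, r.2 ++ ((i : Int), (r.1 : Int)) :: r2.2) := by
            simp only [pvScanB, if_pos hi, hop, ← hr, if_pos hj, ← hr2]
            simp
          rw [hres]
          simp only [] at *
          have hjlen : r.1 < cs.length := by omega
          -- fold over [i, r2.1) from (S, P)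
          have key : ∀ S P, (PySem.List.pyRange (i : Int) ((r.1+1 : Nat) : Int) 1).foldl (pvStepA cs) (some (S, P))
              = some (S, P ++ (r.2 ++ [((i : Int), (r.1 : Int))])) := by
            intro S P
            have c1 : ((i : Int) + 1) = ((i+1 : Nat) : Int) := by push_cast; ring
            have c2 : ((r.1+1 : Nat) : Int) = ((r.1 : Nat) : Int) + 1 := by push_cast; ring
            have hsplit : PySem.List.pyRange (i : Int) ((r.1+1 : Nat) : Int) 1
                = (i : Int) :: (PySem.List.pyRange ((i+1 : Nat) : Int) ((r.1 : Nat) : Int) 1 ++ [((r.1 : Nat) : Int)]) := by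
              rw [PySem.List.pyRange_one_cons (by omega), c1, c2,
                  PySem.List.pyRange_one_succ_right (by omega)]
            rw [hsplit]
            simp only [List.foldl_cons, List.foldl_append]
            rw [pvStepA_at cs hlen S P, if_pos hop]
            rw [hfold (S ++ [(i : Int)]) P]
            simp only [List.foldl_nil]
            rw [pvStepA_at cs hjlen, if_neg (by rw [hclose]; decide), if_pos hclose,
                pop_last_append]
            simp
          refine ⟨by omega, g2, ?_, ?_⟩
          · intro hlt
            obtain ⟨c1, c2, c3⟩ := g3 hlt
            refine ⟨c1, ?_, ?_⟩
            · -- counts: [i, r2.1) = {i} ++ [i+1, r.1) ++ {r.1} ++ [r.1+1, r2.1)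
              have sA1 := pvCnt_split cs '(' (show i ≤ i+1 by omega) (show i+1 ≤ r2.1 by omega)
              have sA2 := pvCnt_split cs '(' (show i+1 ≤ r.1 by omega) (show r.1 ≤ r2.1 by omega)
              have sA3 := pvCnt_split cs '(' (show r.1 ≤ r.1+1 by omega) (show r.1+1 ≤ r2.1 by omega)
              have sB1 := pvCnt_split cs ')' (show i ≤ i+1 by omega) (show i+1 ≤ r2.1 by omega)
              have sB2 := pvCnt_split cs ')' (show i+1 ≤ r.1 by omega) (show r.1 ≤ r2.1 by omega)
              have sB3 := pvCnt_split cs ')' (show r.1 ≤ r.1+1 by omega) (show r.1+1 ≤ r2.1 by omega)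
              have u1 : pvCnt cs '(' i (i+1) = 1 := by
                rw [pvCnt_single cs '(' hlen, hop]; decide
              have u2 : pvCnt cs ')' i (i+1) = 0 := by
                rw [pvCnt_single cs ')' hlen, hop]; decide
              have u3 : pvCnt cs '(' r.1 (r.1+1) = 0 := by
                rw [pvCnt_single cs '(' hjlen, hclose]; decide
              have u4 : pvCnt cs ')' r.1 (r.1+1) = 1 := by
                rw [pvCnt_single cs ')' hjlen, hclose]; decide
              omega
            · intro S P
              have hsplit : PySem.List.pyRange (i : Int) ((r2.1 : Nat) : Int) 1
                  = PySem.List.pyRange (i : Int) ((r.1+1 : Nat) : Int) 1 ++ PySem.List.pyRange ((r.1+1 : Nat) : Int) ((r2.1 : Nat) : Int) 1 := by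
                exact PySem.List.pyRange_one_append _ _ _ (by omega) (by omega)
              rw [hsplit, List.foldl_append, key S P, c3]
              simp
          · intro heq S P
            obtain ⟨T, hT⟩ := g4 heq S (P ++ (r.2 ++ [((i : Int), (r.1 : Int))]))
            refine ⟨T, ?_⟩
            have hsplit : PySem.List.pyRange (i : Int) ((e : Nat) : Int) 1
                = PySem.List.pyRange (i : Int) ((r.1+1 : Nat) : Int) 1 ++ PySem.List.pyRange ((r.1+1 : Nat) : Int) ((e : Nat) : Int) 1 := by
              exact PySem.List.pyRange_one_append _ _ _ (by omega) (by omega)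
            rw [hsplit, List.foldl_append, key S P, hT]
            simp
        · -- inner scan ran to e: result (e, r.2)
          have hje : r.1 = e := by omega
          have hres : pvScanB cs e (fuel+1) i = (e, r.2) := by
            simp only [pvScanB, if_pos hi, hop, ← hr, if_neg hj]
            simp
          rw [hres]
          refine ⟨by omega, le_refl _, by omega, ?_⟩
          intro _ S P
          obtain ⟨T, hT⟩ := h4 hje (S ++ [(i : Int)]) P
          refine ⟨(i : Int) :: T, ?_⟩
          rw [PySem.List.pyRange_one_cons (by exact_mod_cast hi)]
          simp only [List.foldl_cons]
          rw [pvStepA_at cs hlen S P, if_pos hop]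
          have : ((i : Int) + 1) = ((i+1 : Nat) : Int) := by push_cast; ring
          rw [this, hT]
          simp
      · by_cases hcl : cs.getD i ' ' = ')'
        · -- ')' branch: stop here
          have hres : pvScanB cs e (fuel+1) i = (i, []) := by
            simp only [pvScanB, if_pos hi, hcl]
            simp
          rw [hres]
          refine ⟨le_refl _, by omega, ?_, by omega⟩
          intro _
          refine ⟨hcl, by rw [pvCnt_self, pvCnt_self], ?_⟩
          intro S P
          rw [PySem.List.pyRange_one_eq_nil (by omega)]
          simp
        · -- other character
          obtain ⟨h1, h2, h3, h4⟩ := ih (i+1) (by omega) (by omega)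
          set r := pvScanB cs e fuel (i+1) with hr
          have hres : pvScanB cs e (fuel+1) i = r := by
            simp only [pvScanB, if_pos hi, if_neg hop, if_neg hcl, ← hr]
          rw [hres]
          have hstep : ∀ S P, pvStepA cs (some (S, P)) (i : Int) = some (S, P) := by
            intro S P
            rw [pvStepA_at cs hlen, if_neg hop, if_neg hcl]
          refine ⟨by omega, h2, ?_, ?_⟩
          · intro hlt
            obtain ⟨c1, c2, c3⟩ := h3 hlt
            refine ⟨c1, ?_, ?_⟩
            · rw [pvCnt_split cs '(' (by omega : i ≤ i+1) h1,
                  pvCnt_split cs ')' (by omega : i ≤ i+1) h1,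
                  pvCnt_single cs _ hlen, pvCnt_single cs _ hlen,
                  if_neg hop, if_neg hcl, c2]
            · intro S P
              rw [PySem.List.pyRange_one_cons (by exact_mod_cast by omega : (i:Int) < (r.1 : Int))]
              simp only [List.foldl_cons]
              rw [hstep S P]
              have : ((i : Int) + 1) = ((i+1 : Nat) : Int) := by push_cast; ring
              rw [this, c3]
          · intro heq S P
            obtain ⟨T, hT⟩ := h4 heq S P
            refine ⟨T, ?_⟩
            rw [PySem.List.pyRange_one_cons (by exact_mod_cast hi)]
            simp only [List.foldl_cons]
            rw [hstep S P]
            have : ((i : Int) + 1) = ((i+1 : Nat) : Int) := by push_cast; ring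
            rw [this, hT]
    · -- i ≥ e, so i = e
      have hres : pvScanB cs e (fuel+1) i = (e, []) := by
        simp only [pvScanB, if_neg hi]
      rw [hres]
      refine ⟨by omega, le_refl _, ?_, ?_⟩
      · intro h; exact absurd h (lt_irrefl e)
      · intro _ S P
        refine ⟨[], ?_⟩
        rw [PySem.List.pyRange_one_eq_nil (by omega)]
        simp

lemma pvTopB_ge (cs : List Char) (e fuel i : Nat) (h : ¬ i < e) : pvTopB cs e fuel i = [] := by
  cases fuel with
  | zero => rfl
  | succ fuel => simp only [pvTopB, if_neg h]

-- ===== VERDICT (by name: the statement is the Claim_ definition above) =====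
theorem par_group_spec : Claim_equal_par_group := by
  intro tree _hDom hPre
  unfold Spec_par_group par_group par_group_alt
  set cs := tree.toList with hcs
  set e := cs.length - 2 with he
  have hee : e ≤ cs.length := by omega
  -- A's range equals the range over the Nat bound e
  have hrange : PySem.List.pyRange 1 ((cs.length : Int) - 2) 1 = PySem.List.pyRange 1 ((e : Nat) : Int) 1 := by
    rw [PySem.List.pyRange_one, PySem.List.pyRange_one]
    congr 2
    omega
  change (match (PySem.List.pyRange 1 ((cs.length : Int) - 2) 1).foldl (pvStepA cs) (some ([], [])) with
      | none => ([] : List (Int × Int))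
      | some (_, couples) => couples) = pvTopB cs e e 1
  rw [hrange]
  by_cases h1 : 1 < e
  · obtain ⟨s1, s2, s3, s4⟩ := pvScan_spec cs e hee e 1 (by omega) (by omega)
    set r := pvScanB cs e e 1 with hr
    by_cases hlt : r.1 < e
    · -- impossible under Pre_: the interior prefix before this ')' is balanced
      obtain ⟨hclose, hcnt, _⟩ := s3 hlt
      exfalso
      have hcontra := hPre r.1 (by rw [List.mem_range, ← hcs]; omega) (by omega)
        (by rw [← hcs]; omega) (by rw [← hcs]; exact hclose)
      rw [← hcs] at hcontra
      have h1' : ((cs.drop 1).take (r.1 - 1)).count ')' = pvCnt cs ')' 1 r.1 := by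
        unfold pvCnt; rfl
      have h2' : ((cs.drop 1).take (r.1 - 1)).count '(' = pvCnt cs '(' 1 r.1 := by
        unfold pvCnt; rfl
      rw [h1', h2', hcnt] at hcontra
      omega
    · have hre : r.1 = e := by omega
      obtain ⟨T, hT⟩ := s4 hre [] []
      simp only [Nat.cast_one] at hT
      rw [hT]
      -- B's side: one step of the top loop, then the loop ends
      obtain ⟨f, hf⟩ : ∃ f, e = f + 1 := ⟨e - 1, by omega⟩
      rw [hf]
      simp only [pvTopB, if_pos (by omega : 1 < f + 1)]
      rw [← hf, ← hr, pvTopB_ge cs e f (r.1 + 1) (by omega)]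
      simp
  · -- e ≤ 1 : the interior is empty on both sides
    have hnil : PySem.List.pyRange ((1 : Nat) : Int) ((e : Nat) : Int) ((1 : Nat) : Int) = [] :=
      PySem.List.pyRange_one_eq_nil (by omega)
    simp only [Nat.cast_one] at hnil
    rw [hnil]
    simp only [List.foldl_nil]
    obtain he0 | he1 : e = 0 ∨ e = 1 := by omega
    · rw [he0]; rfl
    · rw [he1]; simp [pvTopB]
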